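-- pv_equiv track=rewrite | github.com/yash0307jain/competitive-programming | Python/Dynamic_Prog/knapsack.py | knapsackRecur
-- ===== SOURCE A (Python) =====
-- def knapsackRecur(arr, ind, subWeight, subValue, store, target):
--   if ind == len(arr):
--     return store
--
--   for i in range(ind, len(arr)):
--     valueSub = 0
--
--     if len(subWeight) == 0:
--       valueSub = 0
--     else:
--       valueSub = subWeight[len(subWeight) - 1]
--
--     if (valueSub + arr[i][0]) <= target:
--       tempWeight = subWeight.copy()
--       valueTempWeight = 0
--
--       if len(tempWeight) == 0:
--         valueTempWeight = 0
--       else: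
--         valueTempWeight = tempWeight[len(tempWeight) - 1]
--
--       tempWeight.append(valueTempWeight + arr[i][0])
--
--       tempValue = subValue.copy()
--       valueTempValue = 0
--
--       if len(tempValue) == 0:
--         valueTempValue = 0
--       else:
--         valueTempValue = tempValue[len(tempValue) - 1]
--
--       tempValue.append(valueTempValue + arr[i][1])
--
--       store.append(tempValue)
--       knapsackRecur(arr, i + 1, tempWeight, tempValue, store, target)
--
--   return store
-- ===== SOURCE B (Python) =====
-- def knapsackRecur(arr, ind, subWeight, subValue, store, target):
--   w = subWeight[-1] if subWeight else 0
--   v = subValue[-1] if subValue else 0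
--   stack = [(ind, w, v, subValue.copy())]
--   while stack:
--     i, w, v, prefix = stack.pop()
--     if i >= len(arr):
--       continue
--     wi, vi = arr[i]
--     stack.append((i + 1, w, v, prefix))
--     if w + wi <= target:
--       newPrefix = prefix + [v + vi]
--       store.append(newPrefix)
--       stack.append((i + 1, w + wi, v + vi, newPrefix))
--   return store
-- ===== Notes on version B (the rewrite author's own statement) =====
-- stated objective: alternative
-- what changed: Replaces A's recursion, which threads list-valued weight/value prefix lists through nested calls and rereads their last elements, by an iterative depth-first search over an explicit stack of (index, runningWeight, runningValue, prefix) frames carrying the running weight and value as scalars; Pre_ excludes only the inputs (ind < -len(arr)) on which A raises IndexError.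
import Mathlib
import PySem

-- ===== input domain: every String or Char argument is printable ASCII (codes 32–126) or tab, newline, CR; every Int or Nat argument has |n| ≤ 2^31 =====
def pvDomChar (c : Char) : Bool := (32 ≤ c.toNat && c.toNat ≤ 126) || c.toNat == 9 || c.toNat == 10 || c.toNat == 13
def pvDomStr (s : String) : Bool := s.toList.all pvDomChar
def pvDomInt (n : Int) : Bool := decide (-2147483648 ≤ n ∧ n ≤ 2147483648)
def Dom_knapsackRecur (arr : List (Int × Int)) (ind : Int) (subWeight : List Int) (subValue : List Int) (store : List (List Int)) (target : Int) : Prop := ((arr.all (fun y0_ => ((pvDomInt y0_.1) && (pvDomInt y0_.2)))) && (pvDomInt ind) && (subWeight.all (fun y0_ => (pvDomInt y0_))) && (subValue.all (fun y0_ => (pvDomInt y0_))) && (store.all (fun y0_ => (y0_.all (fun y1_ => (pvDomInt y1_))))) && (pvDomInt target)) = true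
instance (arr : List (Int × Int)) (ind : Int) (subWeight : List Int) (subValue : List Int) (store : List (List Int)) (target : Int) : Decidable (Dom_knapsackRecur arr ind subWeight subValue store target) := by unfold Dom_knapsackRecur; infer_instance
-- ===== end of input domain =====

-- B replaces A's recursion (which threads list-valued weight/value prefixes and rereads
-- their last elements) by an iterative DFS over an explicit stack of frames carrying the
-- running weight and value as scalars (objective: alternative decomposition, same cost).
-- Both A and B mutate the Python `store` argument in place; the equivalence proved here is
-- about the returned value (which is that same list).

-- ===== PORT A =====
-- A's `for i in range(ind, len(arr))` loop is recursion over that index list; the recursive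
-- call knapsackRecur(arr, i+1, ...) continues over range(i+1, len(arr)), the tail of that
-- list (its `ind == len(arr)` early return is the empty-list case).
def knapsackLoopA (arr : List (Int × Int)) (target : Int) :
    List Int → List Int → List Int → List (List Int) → List (List Int)
  | [], _, _, store => store
  | i :: is, subWeight, subValue, store =>
    match PySem.List.pyGet? arr i with
    | none => store   -- arr[i] raises IndexError in Python (outside Pre_)
    | some ai =>
      let valueSub : Int := if subWeight.length = 0 then 0 else (PySem.List.pyGet? subWeight ((subWeight.length : Int) - 1)).getD 0
      if valueSub + ai.1 ≤ target then
        let valueTempWeight : Int := if subWeight.length = 0 then 0 else (PySem.List.pyGet? subWeight ((subWeight.length : Int) - 1)).getD 0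
        let tempWeight := subWeight ++ [valueTempWeight + ai.1]
        let valueTempValue : Int := if subValue.length = 0 then 0 else (PySem.List.pyGet? subValue ((subValue.length : Int) - 1)).getD 0
        let tempValue := subValue ++ [valueTempValue + ai.2]
        let store1 := store ++ [tempValue]
        let store2 := knapsackLoopA arr target is tempWeight tempValue store1
        knapsackLoopA arr target is subWeight subValue store2
      else
        knapsackLoopA arr target is subWeight subValue store

def knapsackRecur (arr : List (Int × Int)) (ind : Int) (subWeight : List Int) (subValue : List Int) (store : List (List Int)) (target : Int) : List (List Int) :=
  if ind = (arr.length : Int) then store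
  else knapsackLoopA arr target (PySem.List.pyRange ind (arr.length : Int) 1) subWeight subValue store

-- ===== PORT B =====
-- Source B's while-loop over the explicit stack; the Lean list's head is the Python stack's top.
-- The Nat argument is fuel making the recursion structural; knapsackRecur_alt passes enough
-- for the loop to run to completion, so the 0-case is never reached from it.
def knapsackLoopB (arr : List (Int × Int)) (target : Int) :
    Nat → List (Int × Int × Int × List Int) → List (List Int) → List (List Int)
  | _, [], store => store
  | 0, _ :: _, store => store   -- out of fuel (unreachable from knapsackRecur_alt)
  | fuel + 1, (i, w, v, pref) :: rest, store =>
    if (arr.length : Int) ≤ i then knapsackLoopB arr target fuel rest store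
    else
      match PySem.List.pyGet? arr i with
      | none => store   -- arr[i] raises IndexError in Python (outside Pre_)
      | some ai =>
        if w + ai.1 ≤ target then
          let newPrefix := pref ++ [v + ai.2]
          knapsackLoopB arr target fuel
            ((i + 1, w + ai.1, v + ai.2, newPrefix) :: (i + 1, w, v, pref) :: rest)
            (store ++ [newPrefix])
        else knapsackLoopB arr target fuel ((i + 1, w, v, pref) :: rest) store

def knapsackRecur_alt (arr : List (Int × Int)) (ind : Int) (subWeight : List Int) (subValue : List Int) (store : List (List Int)) (target : Int) : List (List Int) :=
  let w : Int := if subWeight = [] then 0 else (PySem.List.pyGet? subWeight (-1)).getD 0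
  let v : Int := if subValue = [] then 0 else (PySem.List.pyGet? subValue (-1)).getD 0
  knapsackLoopB arr target (3 ^ (((arr.length : Int) - ind).toNat)) [(ind, w, v, subValue)] store

-- ===== PRECONDITION & SPEC =====
-- Pre_ excludes exactly the inputs on which the Python A raises IndexError
-- (ind below -len(arr), where arr[i] is out of range); A returns on every other input.
def Pre_knapsackRecur (arr : List (Int × Int)) (ind : Int) (subWeight : List Int) (subValue : List Int) (store : List (List Int)) (target : Int) : Prop :=
  -(arr.length : Int) ≤ ind
instance (arr : List (Int × Int)) (ind : Int) (subWeight : List Int) (subValue : List Int) (store : List (List Int)) (target : Int) : Decidable (Pre_knapsackRecur arr ind subWeight subValue store target) := by unfold Pre_knapsackRecur; infer_instance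

def pvWitness_knapsackRecur : (List (Int × Int)) × Int × List Int × List Int × List (List Int) × Int :=
  ([(1, 2), (2, 3)], 0, [], [], [], 3)

def Spec_knapsackRecur (arr : List (Int × Int)) (ind : Int) (subWeight : List Int) (subValue : List Int) (store : List (List Int)) (target : Int) (out : List (List Int)) : Prop := out = knapsackRecur_alt arr ind subWeight subValue store target
instance (arr : List (Int × Int)) (ind : Int) (subWeight : List Int) (subValue : List Int) (store : List (List Int)) (target : Int) (out : List (List Int)) : Decidable (Spec_knapsackRecur arr ind subWeight subValue store target out) := by unfold Spec_knapsackRecur; infer_instance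

-- ===== CLAIM (what is proved, stated in full; the proofs are below) =====
def Claim_equal_knapsackRecur : Prop := ∀ (arr : List (Int × Int)) (ind : Int) (subWeight : List Int) (subValue : List Int) (store : List (List Int)) (target : Int), Dom_knapsackRecur arr ind subWeight subValue store target → Pre_knapsackRecur arr ind subWeight subValue store target → Spec_knapsackRecur arr ind subWeight subValue store target (knapsackRecur arr ind subWeight subValue store target)

-- ===== LEMMAS AND PROOFS =====

-- helper used only by the proofs: last element of a list, 0 for the empty list
def pvLastD (xs : List Int) : Int := xs.getLast?.getD 0

-- A's `subWeight[len(subWeight)-1] if subWeight else 0` pattern computes pvLastD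
lemma pvLastD_len_form (xs : List Int) :
    (if xs.length = 0 then (0:Int) else (PySem.List.pyGet? xs ((xs.length : Int) - 1)).getD 0) = pvLastD xs := by
  cases xs with
  | nil => simp [pvLastD]
  | cons a l =>
    have hcast : ((a :: l).length : Int) - 1 = (((a :: l).length - 1 : Nat) : Int) := by
      simp
    rw [if_neg (by simp), hcast, PySem.List.pyGet?_natCast]
    simp [pvLastD, List.getLast?_eq_getElem?]

-- B's `subWeight[-1] if subWeight else 0` pattern computes pvLastD
lemma pvLastD_neg_form (xs : List Int) :
    (if xs = [] then (0:Int) else (PySem.List.pyGet? xs (-1)).getD 0) = pvLastD xs := by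
  cases xs with
  | nil => simp [pvLastD]
  | cons a l => rw [if_neg (by simp), PySem.List.pyGet?_neg_one]; rfl

lemma pvLastD_concat (xs : List Int) (a : Int) : pvLastD (xs ++ [a]) = a := by
  simp [pvLastD]

lemma loopB_nil (arr : List (Int × Int)) (t : Int) (f : Nat) (store : List (List Int)) :
    knapsackLoopB arr t f [] store = store := by
  cases f <;> rfl

-- measure of a stack: strictly decreases at every step of knapsackLoopB
def pvMu (arr : List (Int × Int)) (stack : List (Int × Int × Int × List Int)) : Nat :=
  (stack.map (fun f => 3 ^ (((arr.length : Int) - f.1).toNat))).sum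

-- fuel irrelevance: any fuel at least the stack's measure gives the same result
lemma loopB_fuel_irrel (arr : List (Int × Int)) (t : Int) : ∀ (n f f' : Nat)
    (stack : List (Int × Int × Int × List Int)) (store : List (List Int)),
    pvMu arr stack ≤ n → pvMu arr stack ≤ f → pvMu arr stack ≤ f' →
    knapsackLoopB arr t f stack store = knapsackLoopB arr t f' stack store := by
  intro n
  induction n with
  | zero =>
    intro f f' stack store hn _ _
    cases stack with
    | nil => rw [loopB_nil, loopB_nil]
    | cons fr rest =>
      exfalso
      have hp : 0 < 3 ^ (((arr.length : Int) - fr.1).toNat) := Nat.pow_pos (by omega)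
      simp only [pvMu, List.map_cons, List.sum_cons] at hn
      omega
  | succ n ih =>
    intro f f' stack store hn hf hf'
    cases stack with
    | nil => rw [loopB_nil, loopB_nil]
    | cons fr rest =>
      obtain ⟨i, w, v, pref⟩ := fr
      have hp : 0 < 3 ^ (((arr.length : Int) - i).toNat) := Nat.pow_pos (by omega)
      simp only [pvMu, List.map_cons, List.sum_cons] at hn hf hf'
      obtain ⟨g, rfl⟩ : ∃ g, f = g + 1 := ⟨f - 1, by omega⟩
      obtain ⟨g', rfl⟩ : ∃ g', f' = g' + 1 := ⟨f' - 1, by omega⟩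
      rw [knapsackLoopB, knapsackLoopB]
      by_cases hlen : (arr.length : Int) ≤ i
      · simp only [if_pos hlen]
        exact ih g g' rest store (by simp only [pvMu]; omega) (by simp only [pvMu]; omega)
          (by simp only [pvMu]; omega)
      · simp only [if_neg hlen]
        cases hai : PySem.List.pyGet? arr i with
        | none => rfl
        | some ai =>
          have hk : (((arr.length : Int) - i).toNat) = (((arr.length : Int) - (i + 1)).toNat) + 1 := by omega
          have hq : 0 < 3 ^ (((arr.length : Int) - (i + 1)).toNat) := Nat.pow_pos (by omega)
          rw [hk, pow_succ] at hn hf hf'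
          by_cases hfit : w + ai.1 ≤ t
          · simp only [if_pos hfit]
            exact ih g g' _ _ (by simp only [pvMu, List.map_cons, List.sum_cons]; omega)
              (by simp only [pvMu, List.map_cons, List.sum_cons]; omega)
              (by simp only [pvMu, List.map_cons, List.sum_cons]; omega)
          · simp only [if_neg hfit]
            exact ih g g' _ _ (by simp only [pvMu, List.map_cons, List.sum_cons]; omega)
              (by simp only [pvMu, List.map_cons, List.sum_cons]; omega)
              (by simp only [pvMu, List.map_cons, List.sum_cons]; omega)

-- the index list A's loop still has to traverse, from index i on
lemma pyRange_empty_of_le (a b : Int) (h : b ≤ a) : PySem.List.pyRange a b 1 = [] := by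
  rw [PySem.List.pyRange_one]
  have : (b - a).toNat = 0 := by omega
  simp [this]

-- Main invariant: popping one frame whose scalars are the last entries of A's prefix lists
-- performs exactly A's loop from that index, then continues with the rest of the stack.
lemma loopB_eq_loopA (arr : List (Int × Int)) (t : Int) : ∀ (n f : Nat) (i w v : Int)
    (sw sv : List Int) (rest : List (Int × Int × Int × List Int)) (store : List (List Int)),
    pvMu arr ((i, w, v, sv) :: rest) ≤ n → pvMu arr ((i, w, v, sv) :: rest) ≤ f →
    -(arr.length : Int) ≤ i → w = pvLastD sw → v = pvLastD sv →
    knapsackLoopB arr t f ((i, w, v, sv) :: rest) store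
      = knapsackLoopB arr t f rest
          (knapsackLoopA arr t (PySem.List.pyRange i (arr.length : Int) 1) sw sv store) := by
  intro n
  induction n with
  | zero =>
    intro f i w v sw sv rest store hn _ _ _ _
    exfalso
    have hp : 0 < 3 ^ (((arr.length : Int) - i).toNat) := Nat.pow_pos (by omega)
    simp only [pvMu, List.map_cons, List.sum_cons] at hn
    omega
  | succ n ih =>
    intro f i w v sw sv rest store hn hf hi hw hv
    have hp : 0 < 3 ^ (((arr.length : Int) - i).toNat) := Nat.pow_pos (by omega)
    simp only [pvMu, List.map_cons, List.sum_cons] at hn hf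
    obtain ⟨g, rfl⟩ : ∃ g, f = g + 1 := ⟨f - 1, by omega⟩
    rw [knapsackLoopB]
    by_cases hlen : (arr.length : Int) ≤ i
    · rw [if_pos hlen, pyRange_empty_of_le i (arr.length : Int) hlen, knapsackLoopA]
      exact loopB_fuel_irrel arr t n g (g + 1) rest store (by simp only [pvMu]; omega)
        (by simp only [pvMu]; omega) (by simp only [pvMu]; omega)
    · rw [if_neg hlen]
      obtain ⟨ai, hai⟩ : ∃ ai, PySem.List.pyGet? arr i = some ai := by
        cases hg : PySem.List.pyGet? arr i with
        | some ai => exact ⟨ai, rfl⟩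
        | none =>
          exfalso
          rw [PySem.List.pyGet?_eq_none_iff] at hg
          exact hg (by constructor <;> omega)
      have hk : (((arr.length : Int) - i).toNat) = (((arr.length : Int) - (i + 1)).toNat) + 1 := by omega
      have hq : 0 < 3 ^ (((arr.length : Int) - (i + 1)).toNat) := Nat.pow_pos (by omega)
      rw [hk, pow_succ] at hn hf
      rw [PySem.List.pyRange_one_cons (by omega), knapsackLoopA]
      simp only [hai, pvLastD_len_form, ← hw, ← hv]
      by_cases hfit : w + ai.1 ≤ t
      · simp only [if_pos hfit]
        rw [ih g (i + 1) (w + ai.1) (v + ai.2) (sw ++ [w + ai.1]) (sv ++ [v + ai.2])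
              ((i + 1, w, v, sv) :: rest) (store ++ [sv ++ [v + ai.2]])
              (by simp only [pvMu, List.map_cons, List.sum_cons]; omega)
              (by simp only [pvMu, List.map_cons, List.sum_cons]; omega)
              (by omega) (pvLastD_concat _ _).symm (pvLastD_concat _ _).symm]
        rw [ih g (i + 1) w v sw sv rest _
              (by simp only [pvMu, List.map_cons, List.sum_cons]; omega)
              (by simp only [pvMu, List.map_cons, List.sum_cons]; omega)
              (by omega) hw hv]
        exact loopB_fuel_irrel arr t n g (g + 1) rest _ (by simp only [pvMu]; omega)
          (by simp only [pvMu]; omega) (by simp only [pvMu]; omega)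
      · simp only [if_neg hfit]
        rw [ih g (i + 1) w v sw sv rest store
              (by simp only [pvMu, List.map_cons, List.sum_cons]; omega)
              (by simp only [pvMu, List.map_cons, List.sum_cons]; omega)
              (by omega) hw hv]
        exact loopB_fuel_irrel arr t n g (g + 1) rest _ (by simp only [pvMu]; omega)
          (by simp only [pvMu]; omega) (by simp only [pvMu]; omega)

-- ===== VERDICT (by name: the statement is the Claim_ definition above) =====
theorem knapsackRecur_spec : Claim_equal_knapsackRecur := by
  intro arr ind sw sv store t _hdom hpre
  unfold Spec_knapsackRecur knapsackRecur knapsackRecur_alt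
  simp only [pvLastD_neg_form]
  rw [loopB_eq_loopA arr t (pvMu arr [(ind, pvLastD sw, pvLastD sv, sv)]) _ ind
        (pvLastD sw) (pvLastD sv) sw sv [] store (le_refl _)
        (by simp [pvMu]) hpre rfl rfl]
  by_cases h : ind = (arr.length : Int)
  · rw [if_pos h, pyRange_empty_of_le ind (arr.length : Int) (by omega), knapsackLoopA, loopB_nil]
  · rw [if_neg h, loopB_nil]
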